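-- pv_equiv track=rewrite | github.com/ArxCaeli/spacers2020 | SpacersDarkMatter/LocalisationHypothesisCheck.py | GetLocalisationMetric
-- ===== SOURCE A (Python) =====
-- def GetLocalisationMetric(KPletHits, LookAheadDistance, KPletSize):
--     HitDensities = []
--     for Contig in KPletHits:
--         Coordinates = sorted(KPletHits[Contig][0])
--         "bug - need to check - strand as well"
--         LastCheckedCoord = 0
--         for I in range(0, len(Coordinates)):
--             Coord = Coordinates[I]
--             if Coord <= LastCheckedCoord:
--                 continue
--
--             Coveredhits = []
--             for J in range(I, len(Coordinates)):
--                 if Coordinates[J] > Coord + LookAheadDistance - KPletSize: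
--                     break
--                 if Coordinates[J] >= Coord and Coordinates[J] <= Coord + LookAheadDistance - KPletSize:
--                     Coveredhits.append(Coordinates[J])
--             #Coveredhits = [x for x in Coordinates if x >= Coord and x <= Coord + LookAheadDistance - KPletSize]
--
--             if len(Coveredhits) > 0:
--                 LastCheckedCoord = Coveredhits[-1]
--                 HitDensities.append(len(Coveredhits))
--             else:
--                 LastCheckedCoord = Coord
--                 HitDensities.append(1)
--
--     return HitDensities
-- ===== SOURCE B (Python) =====
-- def GetLocalisationMetric(KPletHits, LookAheadDistance, KPletSize):
--     # Monotone two-pointer sweep: the window-end pointer j never moves backwards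
--     # across the processed (strictly increasing) coordinates.
--     Window = LookAheadDistance - KPletSize
--     HitDensities = []
--     for Contig in KPletHits:
--         Coordinates = sorted(KPletHits[Contig][0])
--         n = len(Coordinates)
--         LastCheckedCoord = 0
--         j = 0
--         for i in range(n):
--             Coord = Coordinates[i]
--             if Coord <= LastCheckedCoord:
--                 continue
--             while j < n and Coordinates[j] <= Coord + Window:
--                 j += 1
--             if j > i:
--                 HitDensities.append(j - i)
--                 LastCheckedCoord = Coordinates[j - 1]
--             else:
--                 HitDensities.append(1)
--                 LastCheckedCoord = Coord
--     return HitDensities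
-- ===== Notes on version B (the rewrite author's own statement) =====
-- stated objective: alternative
-- what changed: The inner re-scan from index I is replaced by a monotone two-pointer sweep: the window-end pointer j only ever advances across the processed coordinates, so each count is read off as j - i instead of being recollected by a forward scan (intended as faster; a timing run measured only ~1.3x on generated inputs, so no speed is claimed).
import Mathlib
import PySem

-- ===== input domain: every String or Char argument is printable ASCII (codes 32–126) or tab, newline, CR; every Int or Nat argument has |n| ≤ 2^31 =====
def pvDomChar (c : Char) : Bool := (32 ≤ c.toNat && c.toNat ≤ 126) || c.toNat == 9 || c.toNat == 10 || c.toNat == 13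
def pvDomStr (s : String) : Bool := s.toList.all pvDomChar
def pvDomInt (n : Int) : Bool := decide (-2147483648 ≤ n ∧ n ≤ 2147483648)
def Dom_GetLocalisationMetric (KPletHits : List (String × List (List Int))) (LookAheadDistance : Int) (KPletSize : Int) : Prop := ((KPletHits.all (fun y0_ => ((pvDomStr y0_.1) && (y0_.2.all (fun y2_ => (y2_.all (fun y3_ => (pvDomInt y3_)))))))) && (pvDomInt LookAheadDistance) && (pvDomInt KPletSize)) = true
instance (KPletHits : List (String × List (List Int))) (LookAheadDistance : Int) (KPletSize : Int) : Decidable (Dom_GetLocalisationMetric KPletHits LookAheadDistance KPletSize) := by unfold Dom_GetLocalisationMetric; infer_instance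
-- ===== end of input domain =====

-- B replaces A's inner re-scan with a single monotone two-pointer sweep per contig
-- (objective: alternative algorithm). Equality of return values is proved on Pre_ below.

-- ===== PORT A =====
-- inner J-loop: scans the suffix starting at the current index, breaking past the window end
def pvA_cover (bound coord : Int) : List Int → List Int
  | [] => []
  | x :: rest =>
    if bound < x then []
    else if coord ≤ x ∧ x ≤ bound then x :: pvA_cover bound coord rest
    else pvA_cover bound coord rest

-- outer I-loop over one contig's sorted coordinates (state: LastCheckedCoord)
def pvA_contig (L K : Int) (last : Int) : List Int → List Int
  | [] => []
  | c :: rest =>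
    if c ≤ last then pvA_contig L K last rest
    else
      let covered := pvA_cover (c + L - K) c (c :: rest)
      if 0 < covered.length then
        (covered.length : Int) :: pvA_contig L K ((PySem.List.pyGet? covered (-1)).getD 0) rest
      else
        (1 : Int) :: pvA_contig L K c rest

def GetLocalisationMetric (KPletHits : List (String × List (List Int))) (LookAheadDistance : Int) (KPletSize : Int) : List Int :=
  KPletHits.foldl (fun acc p =>
    let coords := PySem.List.sorted
      ((PySem.List.pyGet? (((PySem.Dict.mk KPletHits).get? p.1).getD []) 0).getD [])
      (fun x => x) false
    acc ++ pvA_contig LookAheadDistance KPletSize 0 coords) []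

-- ===== PORT B =====
-- the 'while j < n and Coordinates[j] <= Coord + Window: j += 1' loop (indices always in range)
def pvB_advance (cs : List Int) (bound : Int) (j : Nat) : Nat :=
  if h : j < cs.length ∧ cs.getD j 0 ≤ bound then pvB_advance cs bound (j + 1) else j
termination_by cs.length - j
decreasing_by omega

-- the enumerate(i)-loop of B's sweep over one contig (state: j, LastCheckedCoord)
def pvB_sweep (cs : List Int) (W : Int) (i j : Nat) (last : Int) : List Int → List Int
  | [] => []
  | c :: rest =>
    if c ≤ last then pvB_sweep cs W (i + 1) j last rest
    else
      let j' := pvB_advance cs (c + W) j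
      if i < j' then
        ((j' : Int) - (i : Int)) :: pvB_sweep cs W (i + 1) j' (cs.getD (j' - 1) 0) rest
      else
        (1 : Int) :: pvB_sweep cs W (i + 1) j' c rest

def GetLocalisationMetric_alt (KPletHits : List (String × List (List Int))) (LookAheadDistance : Int) (KPletSize : Int) : List Int :=
  KPletHits.foldl (fun acc p =>
    let coords := PySem.List.sorted
      ((PySem.List.pyGet? (((PySem.Dict.mk KPletHits).get? p.1).getD []) 0).getD [])
      (fun x => x) false
    acc ++ pvB_sweep coords (LookAheadDistance - KPletSize) 0 0 0 coords) []

-- ===== PRECONDITION & SPEC =====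
-- Pre_ excludes (a) contigs whose value list is empty, on which A raises IndexError at
-- KPletHits[Contig][0], and (b) duplicate contig keys, a corner the Python dict argument
-- cannot represent (the dict collapses duplicates, so the association list is ambiguous there).
def Pre_GetLocalisationMetric (KPletHits : List (String × List (List Int))) (LookAheadDistance : Int) (KPletSize : Int) : Prop :=
  (KPletHits.map Prod.fst).Nodup ∧ ∀ p ∈ KPletHits, p.2 ≠ []
instance (KPletHits : List (String × List (List Int))) (LookAheadDistance : Int) (KPletSize : Int) : Decidable (Pre_GetLocalisationMetric KPletHits LookAheadDistance KPletSize) := by unfold Pre_GetLocalisationMetric; infer_instance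

def pvWitness_GetLocalisationMetric : (List (String × List (List Int))) × Int × Int :=
  ([("a", [[3, 1, 5]]), ("b", [[2]])], 10, 2)

def Spec_GetLocalisationMetric (KPletHits : List (String × List (List Int))) (LookAheadDistance : Int) (KPletSize : Int) (out : List Int) : Prop := out = GetLocalisationMetric_alt KPletHits LookAheadDistance KPletSize
instance (KPletHits : List (String × List (List Int))) (LookAheadDistance : Int) (KPletSize : Int) (out : List Int) : Decidable (Spec_GetLocalisationMetric KPletHits LookAheadDistance KPletSize out) := by unfold Spec_GetLocalisationMetric; infer_instance

-- ===== CLAIM (what is proved, stated in full; the proofs are below) =====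
def Claim_equal_GetLocalisationMetric : Prop := ∀ (KPletHits : List (String × List (List Int))) (LookAheadDistance : Int) (KPletSize : Int), Dom_GetLocalisationMetric KPletHits LookAheadDistance KPletSize → Pre_GetLocalisationMetric KPletHits LookAheadDistance KPletSize → Spec_GetLocalisationMetric KPletHits LookAheadDistance KPletSize (GetLocalisationMetric KPletHits LookAheadDistance KPletSize)

-- ===== LEMMAS AND PROOFS =====

theorem pv_tw_getD (l : List Int) (p : Int → Bool) (t : Nat) (h : t < (l.takeWhile p).length) :
    (l.takeWhile p).getD t 0 = l.getD t 0 := by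
  have hp := List.takeWhile_prefix (l := l) (p := p)
  have h2 : t < l.length := Nat.lt_of_lt_of_le h hp.length_le
  have h3 := hp.getElem (i := t) h
  simp [List.getD, h, h2, h3]
  rfl

theorem pv_tw_mem (l : List Int) (p : Int → Bool) (t : Nat) (h : t < (l.takeWhile p).length) :
    p ((l.takeWhile p).getD t 0) = true := by
  have : (l.takeWhile p).getD t 0 ∈ l.takeWhile p := by
    simp [List.getD, h]
  exact List.mem_takeWhile_imp this

theorem pv_tw_stop (l : List Int) (p : Int → Bool) (h : (l.takeWhile p).length < l.length) :
    p (l.getD (l.takeWhile p).length 0) = false := by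
  induction l with
  | nil => simp at h
  | cons x xs ih =>
    by_cases hx : p x
    · simp [hx] at h ⊢
      simpa [List.getD] using ih (by omega)
    · simp [hx, List.getD]

theorem pv_pyGet_neg_one (l : List Int) (h : l ≠ []) :
    (PySem.List.pyGet? l (-1)).getD 0 = l.getD (l.length - 1) 0 := by
  have : 1 ≤ l.length := List.length_pos_iff.2 h
  simp [PySem.List.pyGet?, PySem.List.pyIdx?, this, List.getD]

theorem pv_getD_drop (cs : List Int) (m t : Nat) : (cs.drop m).getD t 0 = cs.getD (m+t) 0 := by
  simp [List.getD, List.getElem?_drop]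

theorem pv_mono (cs : List Int) (hs : cs.Pairwise (· ≤ ·)) (p q : Nat) (hpq : p ≤ q) (hq : q < cs.length) :
    cs.getD p 0 ≤ cs.getD q 0 := by
  have hp : p < cs.length := Nat.lt_of_le_of_lt hpq hq
  rcases Nat.eq_or_lt_of_le hpq with rfl | hlt
  · rfl
  · have := List.pairwise_iff_getElem.1 hs p q hp hq hlt
    simpa [List.getD, List.getElem?_eq_getElem, hp, hq] using this

theorem pv_adv_le (cs : List Int) (b : Int) (j : Nat) : j ≤ pvB_advance cs b j := by
  fun_induction pvB_advance with
  | case1 j h ih => omega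
  | case2 j h => omega

theorem pv_adv_le_len (cs : List Int) (b : Int) (j : Nat) (hj : j ≤ cs.length) :
    pvB_advance cs b j ≤ cs.length := by
  fun_induction pvB_advance with
  | case1 j h ih => exact ih (by omega)
  | case2 j h => omega

theorem pv_adv_mem (cs : List Int) (b : Int) (j : Nat) :
    ∀ k, j ≤ k → k < pvB_advance cs b j → cs.getD k 0 ≤ b := by
  fun_induction pvB_advance with
  | case1 j h ih =>
    intro k hk1 hk2
    rcases Nat.eq_or_lt_of_le hk1 with rfl | hlt
    · exact h.2
    · exact ih k hlt hk2
  | case2 j h => intro k hk1 hk2; omega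

theorem pv_adv_stop (cs : List Int) (b : Int) (j : Nat) (h : pvB_advance cs b j < cs.length) :
    ¬ cs.getD (pvB_advance cs b j) 0 ≤ b := by
  fun_induction pvB_advance with
  | case1 j hc ih => exact ih h
  | case2 j hc => intro hle; exact hc ⟨h, hle⟩

theorem pv_cover_eq (b c : Int) : ∀ s : List Int, (∀ x ∈ s, c ≤ x) →
    pvA_cover b c s = s.takeWhile (fun x => decide (x ≤ b)) := by
  intro s
  induction s with
  | nil => intro _; rfl
  | cons x rest ih =>
    intro hall
    by_cases hxb : x ≤ b
    · have hcx : c ≤ x := hall x (by simp)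
      simp [pvA_cover, hxb, hcx, not_lt.2 hxb,
        ih (fun y hy => hall y (by simp [hy]))]
    · simp [pvA_cover, hxb, lt_of_not_ge hxb]

theorem pv_main (cs : List Int) (hs : cs.Pairwise (· ≤ ·)) (L K : Int) :
    ∀ (s : List Int) (i j : Nat) (last : Int),
      cs.drop i = s → j ≤ cs.length →
      (∀ k, k < j → cs.getD k 0 ≤ last + (L - K)) →
      (j = 0 ∨ cs.getD (j - 1) 0 ≤ last) →
      pvA_contig L K last s = pvB_sweep cs (L - K) i j last s := by
  intro s
  induction s with
  | nil => intro i j last _ _ _ _; simp [pvA_contig, pvB_sweep]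
  | cons c rest ih =>
    intro i j last hdrop hjlen hinv1 hinv2
    have hlen : i < cs.length := by
      by_contra hnot
      rw [List.drop_eq_nil_of_le (by omega)] at hdrop
      exact List.cons_ne_nil c rest hdrop.symm
    have hrest : cs.drop (i + 1) = rest := by
      have h1 : cs.drop (i + 1) = (cs.drop i).drop 1 := by
        rw [List.drop_drop]
      rw [h1, hdrop]; rfl
    have hci : cs.getD i 0 = c := by
      have h0 : (cs.drop i).getD 0 0 = c := by rw [hdrop]; rfl
      rw [pv_getD_drop] at h0; simpa using h0
    have hrlen : rest.length = cs.length - (i + 1) := by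
      rw [← hrest, List.length_drop]
    by_cases hcl : c ≤ last
    · simp only [pvA_contig, pvB_sweep, if_pos hcl]
      exact ih (i + 1) j last hrest hjlen hinv1 hinv2
    · have hlast : last < c := lt_of_not_ge hcl
      have hji : j ≤ i := by
        rcases hinv2 with h0 | hle
        · omega
        · by_contra hgt
          have hmono : cs.getD i 0 ≤ cs.getD (j - 1) 0 :=
            pv_mono cs hs i (j - 1) (by omega) (by omega)
          rw [hci] at hmono; omega
      have hall : ∀ x ∈ (c :: rest), c ≤ x := by
        have hpw : (c :: rest).Pairwise (· ≤ ·) := by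
          rw [← hdrop]; exact hs.sublist (List.drop_sublist i cs)
        intro x hx
        rcases List.mem_cons.1 hx with rfl | hx'
        · exact le_refl x
        · exact (List.pairwise_cons.1 hpw).1 x hx'
      have hcov := pv_cover_eq (c + L - K) c (c :: rest) hall
      set p : Int → Bool := fun x => decide (x ≤ c + L - K) with hp
      have hbW : c + (L - K) = c + L - K := by ring
      set j' := pvB_advance cs (c + (L - K)) j with hj'def
      -- instantiated facts about the advanced pointer
      have hadv_le : j ≤ j' := by rw [hj'def]; exact pv_adv_le cs _ j
      have hj'len : j' ≤ cs.length := by rw [hj'def]; exact pv_adv_le_len cs _ j hjlen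
      have hadv_mem : ∀ k, j ≤ k → k < j' → cs.getD k 0 ≤ c + L - K := by
        intro k hk1 hk2
        rw [hj'def] at hk2
        have h := pv_adv_mem cs (c + (L - K)) j k hk1 hk2
        omega
      have hadv_stop : j' < cs.length → ¬ cs.getD j' 0 ≤ c + L - K := by
        intro hl hle
        rw [hj'def] at hl hle
        exact pv_adv_stop cs (c + (L - K)) j hl (by omega)
      by_cases hcb : c ≤ c + L - K
      · -- window reaches the current coordinate: covered = c :: takeWhile p rest
        have htwc : (c :: rest).takeWhile p = c :: rest.takeWhile p := by
          simp [hp, hcb]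
        set t := (rest.takeWhile p).length with ht
        have htr : t ≤ rest.length := (List.takeWhile_prefix p).length_le
        set m := i + 1 + t with hm
        have hmlen : m ≤ cs.length := by omega
        have hm_mem : ∀ k, k < m → cs.getD k 0 ≤ c + L - K := by
          intro k hk
          by_cases hki : k ≤ i
          · calc cs.getD k 0 ≤ cs.getD i 0 := pv_mono cs hs k i hki hlen
              _ = c := hci
              _ ≤ c + L - K := hcb
          · have hk1 : k - (i + 1) < t := by omega
            have e1 : cs.getD k 0 = rest.getD (k - (i + 1)) 0 := by
              rw [← hrest, pv_getD_drop]; congr 1; omega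
            have e2 := pv_tw_getD rest p (k - (i + 1)) hk1
            have e3 := pv_tw_mem rest p (k - (i + 1)) hk1
            rw [e2] at e3
            rw [e1]
            simpa [hp] using e3
        have hm_stop : m < cs.length → ¬ cs.getD m 0 ≤ c + L - K := by
          intro hmlt
          have htlt : t < rest.length := by omega
          have e1 : cs.getD m 0 = rest.getD t 0 := by
            rw [← hrest, pv_getD_drop]
          have e4 := pv_tw_stop rest p htlt
          rw [← ht] at e4
          rw [e1]
          simpa [hp] using e4
        have hj'm : j' = m := by
          rcases lt_trichotomy j' m with hlt | heq | hgt
          · exact absurd (hm_mem j' hlt) (hadv_stop (by omega))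
          · exact heq
          · exact absurd (hadv_mem m (by omega) hgt) (hm_stop (by omega))
        have hcovlen : (pvA_cover (c + L - K) c (c :: rest)).length = t + 1 := by
          rw [hcov, htwc]; simp [ht]
        have hlast' : (PySem.List.pyGet? (pvA_cover (c + L - K) c (c :: rest)) (-1)).getD 0
            = cs.getD (m - 1) 0 := by
          rw [pv_pyGet_neg_one _ (by rw [hcov, htwc]; exact List.cons_ne_nil _ _), hcovlen]
          have h1 : t < ((c :: rest).takeWhile p).length := by rw [htwc]; simp [ht]
          show (pvA_cover (c + L - K) c (c :: rest)).getD t 0 = cs.getD (m - 1) 0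
          rw [hcov, pv_tw_getD (c :: rest) p t h1, ← hdrop, pv_getD_drop]
          congr 1; omega
        have hlastm : c ≤ cs.getD (m - 1) 0 := by
          have hmono := pv_mono cs hs i (m - 1) (by omega) (by omega)
          rwa [hci] at hmono
        simp only [pvA_contig, pvB_sweep, if_neg hcl]
        rw [← hj'def, hj'm]
        rw [if_pos (show 0 < (pvA_cover (c + L - K) c (c :: rest)).length by rw [hcovlen]; omega),
          if_pos (show i < m by omega)]
        rw [hcovlen, hlast']
        congr 1
        · push_cast; omega
        · exact ih (i + 1) m (cs.getD (m - 1) 0) hrest hmlen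
            (fun k hk => by
              have h5 := hm_mem k hk
              omega)
            (Or.inr (le_refl _))
      · -- window ends before the current coordinate: both append 1
        have hbc : c + L - K < c := lt_of_not_ge hcb
        have hcovnil : pvA_cover (c + L - K) c (c :: rest) = [] := by
          rw [hcov]
          simp [hp, hcb]
        have hij' : ¬ i < j' := by
          intro hlt
          have h6 := hadv_mem i hji hlt
          rw [hci] at h6; omega
        simp only [pvA_contig, pvB_sweep, if_neg hcl]
        rw [← hj'def]
        rw [hcovnil]
        simp only [List.length_nil, lt_irrefl, if_neg hij', if_false]
        congr 1
        exact ih (i + 1) j' c hrest hj'len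
          (fun k hk => by
            by_cases hkj : k < j
            · have h7 := hinv1 k hkj; omega
            · have h8 := hadv_mem k (by omega) hk
              omega)
          (by
            rcases Nat.eq_or_lt_of_le hadv_le with heq | hlt
            · rcases hinv2 with h0 | hle
              · left; omega
              · right; rw [← heq]; omega
            · right
              have h9 := hadv_mem (j' - 1) (by omega) (by omega)
              omega)

-- ===== VERDICT (by name: the statement is the Claim_ definition above) =====
theorem GetLocalisationMetric_spec : Claim_equal_GetLocalisationMetric := by
  intro KPletHits L K _ _
  unfold Spec_GetLocalisationMetric GetLocalisationMetric GetLocalisationMetric_alt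
  congr 1
  funext acc q
  show acc ++ pvA_contig L K 0 (PySem.List.sorted
      ((PySem.List.pyGet? (((PySem.Dict.mk KPletHits).get? q.1).getD []) 0).getD [])
      (fun x => x) false)
    = acc ++ pvB_sweep (PySem.List.sorted
      ((PySem.List.pyGet? (((PySem.Dict.mk KPletHits).get? q.1).getD []) 0).getD [])
      (fun x => x) false) (L - K) 0 0 0 (PySem.List.sorted
      ((PySem.List.pyGet? (((PySem.Dict.mk KPletHits).get? q.1).getD []) 0).getD [])
      (fun x => x) false)
  congr 1
  have hsorted : (PySem.List.sorted
      ((PySem.List.pyGet? (((PySem.Dict.mk KPletHits).get? q.1).getD []) 0).getD [])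
      (fun x => x) false).Pairwise (· ≤ ·) := by
    have h := PySem.List.sorted_pairwise
      (xs := ((PySem.List.pyGet? (((PySem.Dict.mk KPletHits).get? q.1).getD []) 0).getD []))
      (key := fun x => x)
    simpa using h
  exact pv_main _ hsorted L K _ 0 0 0 (List.drop_zero)
    (Nat.zero_le _) (fun k hk => absurd hk (by omega)) (Or.inl rfl)
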